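-- pv_equiv track=rewrite | github.com/Universite-Gustave-Eiffel/I-Simpa | Source/make_setup_win/readpspsversion.py | GetFirstOccurance
-- ===== SOURCE A (Python) =====
-- def GetFirstOccurance(line, endlinearr):
--     nearest=-1
--     for ele in endlinearr:
--         addr=line.find(ele)
--         if addr!=-1 and (addr<nearest or nearest==-1):
--             nearest=addr
--     if nearest==-1:
--         nearest=len(line)
--     return nearest
-- ===== SOURCE B (Python) =====
-- def GetFirstOccurance(line, endlinearr):
--     # Scan the line position by position; return the first index where any
--     # delimiter begins; if none occurs anywhere, return len(line).
--     for i in range(len(line)):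
--         for ele in endlinearr:
--             if line.startswith(ele, i):
--                 return i
--     return len(line)
-- ===== Notes on version B (the rewrite author's own statement) =====
-- stated objective: alternative
-- what changed: B inverts the traversal: instead of computing find() over the whole line for every delimiter and keeping the minimum, it scans the line position by position and returns at the first index where any delimiter starts (early exit), with len(line) as the fallthrough; not claimed faster because when no delimiter occurs B scans every position at Python level while A uses C-level find.
import Mathlib
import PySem

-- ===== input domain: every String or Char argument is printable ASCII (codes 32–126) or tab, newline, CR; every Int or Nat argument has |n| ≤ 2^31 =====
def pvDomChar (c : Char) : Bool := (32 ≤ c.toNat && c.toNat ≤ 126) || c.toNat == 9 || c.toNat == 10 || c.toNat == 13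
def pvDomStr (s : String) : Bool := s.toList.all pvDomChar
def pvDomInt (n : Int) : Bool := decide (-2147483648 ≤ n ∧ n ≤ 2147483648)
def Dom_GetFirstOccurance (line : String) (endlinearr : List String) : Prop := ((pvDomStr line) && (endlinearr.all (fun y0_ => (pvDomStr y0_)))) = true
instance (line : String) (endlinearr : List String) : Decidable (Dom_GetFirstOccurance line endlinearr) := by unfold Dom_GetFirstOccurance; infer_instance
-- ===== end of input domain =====

-- B scans the line position by position with early exit instead of taking the minimum of per-delimiter find()s; alternative decomposition, same result.


-- ===== PORT A =====
def GetFirstOccurance (line : String) (endlinearr : List String) : Int :=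
  let nearest : Int := endlinearr.foldl (fun nearest ele =>
    let addr := PySem.Str.find line ele
    if addr ≠ -1 ∧ (addr < nearest ∨ nearest = -1) then addr else nearest) (-1)
  if nearest = -1 then (line.toList.length : Int) else nearest

-- ===== PORT B =====
-- line.startswith(ele, i) with 0 ≤ i ≤ len(line) is exactly a prefix test on the tail dropped at i
def pvAltAny (s : List Char) (i : Nat) : List String → Bool
  | [] => false
  | ele :: rest => if PySem.Chars.startswith (s.drop i) ele.toList then true else pvAltAny s i rest

def pvAltScan (s : List Char) (endlinearr : List String) : List Nat → Option Nat
  | [] => none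
  | i :: rest => if pvAltAny s i endlinearr then some i else pvAltScan s endlinearr rest

def GetFirstOccurance_alt (line : String) (endlinearr : List String) : Int :=
  match pvAltScan line.toList endlinearr (List.range line.toList.length) with
  | some i => (i : Int)
  | none => (line.toList.length : Int)

-- ===== PRECONDITION & SPEC =====
def Spec_GetFirstOccurance (line : String) (endlinearr : List String) (out : Int) : Prop := out = GetFirstOccurance_alt line endlinearr
instance (line : String) (endlinearr : List String) (out : Int) : Decidable (Spec_GetFirstOccurance line endlinearr out) := by unfold Spec_GetFirstOccurance; infer_instance

-- ===== CLAIM (what is proved, stated in full; the proofs are below) =====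
def Claim_equal_GetFirstOccurance : Prop := ∀ (line : String) (endlinearr : List String), Dom_GetFirstOccurance line endlinearr → Spec_GetFirstOccurance line endlinearr (GetFirstOccurance line endlinearr)

-- ===== LEMMAS AND PROOFS =====

theorem pvAltAny_iff (s : List Char) (i : Nat) (arr : List String) :
    pvAltAny s i arr = true ↔ ∃ e ∈ arr, e.toList <+: s.drop i := by
  induction arr with
  | nil => simp [pvAltAny]
  | cons ele rest ih =>
    simp only [pvAltAny]
    by_cases h : PySem.Chars.startswith (s.drop i) ele.toList
    · simp [h, (PySem.Chars.startswith_iff _ _).mp h]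
    · have h' : ¬ ele.toList <+: s.drop i := fun hp => h ((PySem.Chars.startswith_iff _ _).mpr hp)
      simp [h, ih, h']

theorem pvAltScan_eq_find? (s : List Char) (arr : List String) (l : List Nat) :
    pvAltScan s arr l = l.find? (fun i => pvAltAny s i arr) := by
  induction l with
  | nil => rfl
  | cons i rest ih => simp only [pvAltScan, List.find?]; split_ifs with h <;> simp [h, ih]

theorem pvFind?_range_some (p : Nat → Bool) (i : Nat) (h2 : p i = true)
    (h3 : ∀ j < i, p j = false) : ∀ n, i < n → (List.range n).find? p = some i := by
  intro n
  induction n with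
  | zero => omega
  | succ m ih =>
    intro h1
    rw [List.range_succ, List.find?_append]
    rcases Nat.lt_or_ge i m with h | h
    · rw [ih h]; rfl
    · have hi : i = m := by omega
      subst hi
      have hnone : (List.range i).find? p = none := by
        rw [List.find?_eq_none]
        intro x hx; simp [h3 x (List.mem_range.mp hx)]
      rw [hnone]; simp [h2]

theorem pvFind?_range_none (p : Nat → Bool) (n : Nat) (h : ∀ j < n, p j = false) :
    (List.range n).find? p = none := by
  rw [List.find?_eq_none]; intro x hx; simp [h x (List.mem_range.mp hx)]

-- the A-side fold: its result is achieved, is a lower bound of the found finds, and preserves non-(-1)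
theorem pvFoldA_spec (line : String) (arr : List String) (c : Int) :
    (List.foldl (fun nearest ele =>
        let addr := PySem.Str.find line ele
        if addr ≠ -1 ∧ (addr < nearest ∨ nearest = -1) then addr else nearest) c arr = c ∨
      ∃ e ∈ arr, List.foldl (fun nearest ele =>
        let addr := PySem.Str.find line ele
        if addr ≠ -1 ∧ (addr < nearest ∨ nearest = -1) then addr else nearest) c arr = PySem.Str.find line e ∧ PySem.Str.find line e ≠ -1) ∧
    (∀ e ∈ arr, PySem.Str.find line e ≠ -1 →
      List.foldl (fun nearest ele =>
        let addr := PySem.Str.find line ele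
        if addr ≠ -1 ∧ (addr < nearest ∨ nearest = -1) then addr else nearest) c arr ≠ -1 ∧
      List.foldl (fun nearest ele =>
        let addr := PySem.Str.find line ele
        if addr ≠ -1 ∧ (addr < nearest ∨ nearest = -1) then addr else nearest) c arr ≤ PySem.Str.find line e) ∧
    (c ≠ -1 →
      List.foldl (fun nearest ele =>
        let addr := PySem.Str.find line ele
        if addr ≠ -1 ∧ (addr < nearest ∨ nearest = -1) then addr else nearest) c arr ≠ -1 ∧
      List.foldl (fun nearest ele =>
        let addr := PySem.Str.find line ele
        if addr ≠ -1 ∧ (addr < nearest ∨ nearest = -1) then addr else nearest) c arr ≤ c) := by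
  induction arr generalizing c with
  | nil => exact ⟨Or.inl rfl, by simp, fun hc => ⟨hc, le_refl _⟩⟩
  | cons ele rest ih =>
    simp only [List.foldl_cons, List.mem_cons]
    set c1 : Int := (if PySem.Str.find line ele ≠ -1 ∧ (PySem.Str.find line ele < c ∨ c = -1)
        then PySem.Str.find line ele else c) with hc1
    obtain ⟨ihach, ihlb, ihpre⟩ := ih c1
    refine ⟨?_, ?_, ?_⟩
    · rcases ihach with h | ⟨e, he, hr⟩
      · by_cases hcond : PySem.Str.find line ele ≠ -1 ∧ (PySem.Str.find line ele < c ∨ c = -1)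
        · right; exact ⟨ele, Or.inl rfl, by rw [h, hc1, if_pos hcond], hcond.1⟩
        · left; rw [h, hc1, if_neg hcond]
      · right; exact ⟨e, Or.inr he, hr⟩
    · rintro e (rfl | he) hfe
      · by_cases hcond : PySem.Str.find line e ≠ -1 ∧ (PySem.Str.find line e < c ∨ c = -1)
        · have hc1e : c1 = PySem.Str.find line e := by rw [hc1, if_pos hcond]
          have := ihpre (by rw [hc1e]; exact hfe)
          exact ⟨this.1, by rw [← hc1e]; exact this.2⟩
        · have hcc : c ≤ PySem.Str.find line e ∧ c ≠ -1 := by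
            constructor <;> (by_contra hco; exact hcond ⟨hfe, by omega⟩)
          have hc1e : c1 = c := by rw [hc1, if_neg hcond]
          have := ihpre (by rw [hc1e]; exact hcc.2)
          refine ⟨this.1, le_trans this.2 ?_⟩
          rw [hc1e]; exact hcc.1
      · exact ihlb e he hfe
    · intro hc
      by_cases hcond : PySem.Str.find line ele ≠ -1 ∧ (PySem.Str.find line ele < c ∨ c = -1)
      · have hc1e : c1 = PySem.Str.find line ele := by rw [hc1, if_pos hcond]
        have := ihpre (by rw [hc1e]; exact hcond.1)
        refine ⟨this.1, le_trans this.2 ?_⟩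
        rw [hc1e]
        rcases hcond.2 with h | h
        · exact le_of_lt h
        · exact absurd h hc
      · have hc1e : c1 = c := by rw [hc1, if_neg hcond]
        have := ihpre (by rw [hc1e]; exact hc)
        exact ⟨this.1, by rw [← hc1e]; exact this.2⟩

-- ===== VERDICT (by name: the statement is the Claim_ definition above) =====
theorem GetFirstOccurance_spec : Claim_equal_GetFirstOccurance := by
  intro line arr _
  unfold Spec_GetFirstOccurance GetFirstOccurance GetFirstOccurance_alt
  set s := line.toList with hs
  set n := s.length with hn
  obtain ⟨hach, hlb, _⟩ := pvFoldA_spec line arr (-1)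
  set r : Int := List.foldl (fun nearest ele =>
      let addr := PySem.Str.find line ele
      if addr ≠ -1 ∧ (addr < nearest ∨ nearest = -1) then addr else nearest) (-1) arr with hr
  rw [pvAltScan_eq_find?]
  by_cases hneg : r = -1
  · -- nothing found: every find is -1, so no position matches
    have hnofind : ∀ e ∈ arr, PySem.Str.find line e = -1 := by
      intro e he
      by_contra hne
      exact (hlb e he hne).1 hneg
    have hnone : (List.range n).find? (fun i => pvAltAny s i arr) = none := by
      apply pvFind?_range_none
      intro j _
      rw [Bool.eq_false_iff]
      intro htrue
      obtain ⟨e, he, hpre⟩ := (pvAltAny_iff s j arr).mp htrue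
      have hinfix : e.toList <:+: s :=
        (PySem.Chars.isIn_iff_infix _ _).mp
          ((PySem.Chars.exists_prefix_drop_iff_isIn _ _).mp ⟨j, hpre⟩)
      have : PySem.Str.find line e ≠ -1 := by
        simpa [hs, PySem.Str.find_eq] using (PySem.Chars.find_ne_neg_one_iff s e.toList).mpr hinfix
      exact this (hnofind e he)
    simp [hneg, hnone]
  · -- something found: r is the minimum find; the scan stops exactly at r
    rcases hach with h | ⟨e0, he0, hre0, hfe0⟩
    · exact absurd h hneg
    have hre0' : r = PySem.Chars.find s e0.toList := by
      simpa [hs, PySem.Str.find_eq] using hre0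
    have hr0 : 0 ≤ r := by
      have h1 : -1 ≤ r := by rw [hre0']; exact PySem.Chars.neg_one_le_find s e0.toList
      omega
    set j : Nat := r.toNat with hj
    have hrj : r = (j : Int) := by omega
    have hspec := PySem.Chars.find_spec (s := s) (sub := e0.toList) (by rw [← hre0']; exact hr0)
    have hPj : pvAltAny s j arr = true :=
      (pvAltAny_iff s j arr).mpr ⟨e0, he0, by rw [hj, hre0']; exact hspec.1⟩
    have hmin : ∀ i < j, pvAltAny s i arr = false := by
      intro i hij
      rw [Bool.eq_false_iff]
      intro htrue
      obtain ⟨e, he, hpre⟩ := (pvAltAny_iff s i arr).mp htrue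
      have hinfix : e.toList <:+: s :=
        (PySem.Chars.isIn_iff_infix _ _).mp
          ((PySem.Chars.exists_prefix_drop_iff_isIn _ _).mp ⟨i, hpre⟩)
      have hfind0 : 0 ≤ PySem.Chars.find s e.toList := (PySem.Chars.find_nonneg_iff _ _).mpr hinfix
      have hspece := PySem.Chars.find_spec (s := s) (sub := e.toList) hfind0
      -- find line e ≤ i: otherwise minimality of find contradicts the prefix at i
      have hle : (PySem.Chars.find s e.toList).toNat ≤ i := by
        by_contra hgt
        exact hspece.2 i (by omega) hpre
      have hrle : r ≤ PySem.Chars.find s e.toList := by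
        have := (hlb e he (by
          simpa [hs, PySem.Str.find_eq] using (PySem.Chars.find_ne_neg_one_iff s e.toList).mpr hinfix)).2
        simpa [hs, PySem.Str.find_eq] using this
      omega
    have hle_n : r ≤ (n : Int) := by
      rw [hre0', hn]; exact PySem.Chars.find_le_length s e0.toList
    rcases Nat.lt_or_ge j n with hjn | hjn
    · rw [pvFind?_range_some _ j hPj hmin n hjn]
      simp [hrj]
    · have hjn' : j = n := by omega
      have hnone : (List.range n).find? (fun i => pvAltAny s i arr) = none :=
        pvFind?_range_none _ n (fun i hi => hmin i (by omega))
      rw [hnone]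
      simp [hrj, hjn']
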